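-- pv_equiv track=rewrite | github.com/yves-chevallier/texsmith | src/texsmith/extensions/progressbar/markdown.py | _fence_length
-- ===== SOURCE A (Python) =====
-- def _fence_length(stripped: str) -> int:
--     if not stripped:
--         return 0
--     char = stripped[0]
--     count = 0
--     for ch in stripped:
--         if ch == char:
--             count += 1
--         else:
--             break
--     return count
-- ===== SOURCE B (Python) =====
-- def _fence_length(stripped: str) -> int:
--     if not stripped:
--         return 0
--     char = stripped[0]
--     lo, hi = 0, len(stripped)
--     while lo < hi:
--         mid = (lo + hi + 1) // 2
--         if stripped[:mid] == char * mid: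
--             lo = mid
--         else:
--             hi = mid - 1
--     return lo
-- ===== Notes on version B (the rewrite author's own statement) =====
-- stated objective: alternative
-- what changed: Replaces the linear counting loop with an upper-bound binary search on the largest k whose length-k prefix equals char*k, using the monotonicity of that predicate.
import Mathlib
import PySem

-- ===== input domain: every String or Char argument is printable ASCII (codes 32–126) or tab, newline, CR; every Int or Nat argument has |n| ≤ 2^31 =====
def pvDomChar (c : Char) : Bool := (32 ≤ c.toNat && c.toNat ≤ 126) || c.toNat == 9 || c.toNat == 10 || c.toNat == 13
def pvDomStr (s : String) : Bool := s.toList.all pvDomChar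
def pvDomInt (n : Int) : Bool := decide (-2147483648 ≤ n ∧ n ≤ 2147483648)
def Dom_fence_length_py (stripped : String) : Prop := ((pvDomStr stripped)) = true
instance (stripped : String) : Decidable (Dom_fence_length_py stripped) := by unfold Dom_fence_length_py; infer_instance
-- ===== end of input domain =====

-- B replaces A's linear counting loop by a binary search for the largest k with stripped[:k] == char*k; objective: alternative.

-- ===== PORT A =====
-- the 'for ch in stripped: if ch == char: count += 1 else: break' loop; the break becomes stopping the recursion
def fenceLoopA (char : Char) : List Char → Int → Int
  | [], count => count
  | ch :: rest, count => if ch == char then fenceLoopA char rest (count + 1) else count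

def fence_length_py (stripped : String) : Int :=
  match stripped.toList with
  | [] => 0                                   -- if not stripped: return 0
  | char :: _ => fenceLoopA char stripped.toList 0

-- ===== PORT B =====
-- the 'while lo < hi' binary-search loop of Source B; stripped[:mid] is List.take mid.toNat and
-- char * mid is List.replicate mid.toNat char (both exact here since mid ≥ 0 on every call)
def fenceBisect (cs : List Char) (char : Char) (lo hi : Int) : Int :=
  if h : lo < hi then
    let mid := PySem.Int.floordiv (lo + hi + 1) 2
    if cs.take mid.toNat == List.replicate mid.toNat char then fenceBisect cs char mid hi
    else fenceBisect cs char lo (mid - 1)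
  else lo
termination_by (hi - lo).toNat
decreasing_by
  all_goals
    have h2 : PySem.Int.floordiv (lo + hi + 1) 2 = (lo + hi + 1) / 2 :=
      PySem.Int.floordiv_eq_ediv_of_pos (by omega)
    simp only [h2] at *
    omega

def fence_length_py_alt (stripped : String) : Int :=
  match stripped.toList with
  | [] => 0                                   -- if not stripped: return 0
  | char :: _ => fenceBisect stripped.toList char 0 (stripped.toList.length : Int)

-- ===== PRECONDITION & SPEC =====
def Spec_fence_length_py (stripped : String) (out : Int) : Prop := out = fence_length_py_alt stripped
instance (stripped : String) (out : Int) : Decidable (Spec_fence_length_py stripped out) := by unfold Spec_fence_length_py; infer_instance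

-- ===== CLAIM (what is proved, stated in full; the proofs are below) =====
def Claim_equal_fence_length_py : Prop := ∀ (stripped : String), Dom_fence_length_py stripped → Spec_fence_length_py stripped (fence_length_py stripped)

-- ===== LEMMAS AND PROOFS =====

-- A's loop counts the leading run: it adds the length of the takeWhile prefix to the accumulator
theorem fenceLoopA_eq (char : Char) (cs : List Char) (n : Int) :
    fenceLoopA char cs n = n + ((cs.takeWhile (· == char)).length : Int) := by
  induction cs generalizing n with
  | nil => simp [fenceLoopA]
  | cons ch rest ih =>
      by_cases h : ch = char
      · simp [fenceLoopA, h, List.takeWhile, ih]; ring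
      · have hb : (ch == char) = false := by simp [h]
        simp [fenceLoopA, hb, List.takeWhile]

-- the binary-search predicate is exactly 'k ≤ length of the leading run'
theorem take_eq_replicate_iff (char : Char) (cs : List Char) (n : Nat) :
    cs.take n = List.replicate n char ↔ n ≤ (cs.takeWhile (· == char)).length := by
  induction cs generalizing n with
  | nil =>
      cases n with
      | zero => simp
      | succ m => simp [List.replicate]
  | cons c rest ih =>
      cases n with
      | zero => simp
      | succ m =>
          by_cases h : c = char
          · simp [List.takeWhile, h, List.replicate, ih]
          · have hb : (c == char) = false := by simp [h]
            simp [List.takeWhile, hb, List.replicate, h]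

-- the binary search converges to any L captured between its bounds
theorem fenceBisect_eq (cs : List Char) (char : Char) (L : Nat)
    (hL : L = (cs.takeWhile (· == char)).length) :
    ∀ lo hi : Int, lo ≤ L → (L : Int) ≤ hi → fenceBisect cs char lo hi = L := by
  intro lo hi
  induction lo, hi using fenceBisect.induct cs char with
  | case1 lo hi h mid hp ih =>
      intro h1 h2
      have h2' : mid = (lo + hi + 1) / 2 := PySem.Int.floordiv_eq_ediv_of_pos (by omega)
      have hmid : lo < mid ∧ mid ≤ hi := by constructor <;> omega
      rw [fenceBisect]
      simp only [dif_pos h]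
      rw [if_pos hp]
      have : mid.toNat ≤ L := by
        rw [hL]; exact (take_eq_replicate_iff char cs mid.toNat).1 (by simpa using hp)
      exact ih (by omega) h2
  | case2 lo hi h mid hp ih =>
      intro h1 h2
      have h2' : mid = (lo + hi + 1) / 2 := PySem.Int.floordiv_eq_ediv_of_pos (by omega)
      have hmid : lo < mid ∧ mid ≤ hi := by constructor <;> omega
      rw [fenceBisect]
      simp only [dif_pos h]
      rw [if_neg hp]
      have : ¬ mid.toNat ≤ L := by
        rw [hL]; intro hc
        exact hp (by simpa using (take_eq_replicate_iff char cs mid.toNat).2 (hL ▸ hc))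
      exact ih h1 (by omega)
  | case3 lo hi h =>
      intro h1 h2
      rw [fenceBisect]
      simp only [dif_neg h]
      omega

-- ===== VERDICT (by name: the statement is the Claim_ definition above) =====
theorem fence_length_py_spec : Claim_equal_fence_length_py := by
  intro s _
  unfold Spec_fence_length_py fence_length_py fence_length_py_alt
  cases h : s.toList with
  | nil => simp
  | cons c rest =>
      show fenceLoopA c (c :: rest) 0 = fenceBisect (c :: rest) c 0 ((c :: rest).length : Int)
      rw [fenceLoopA_eq, fenceBisect_eq (c :: rest) c (((c :: rest).takeWhile (· == c)).length) rfl]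
      · ring
      · omega
      · exact_mod_cast (List.takeWhile_sublist _).length_le
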